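-- pv_equiv track=rewrite | github.com/pathak-aman/LeetCode_Practice | Contests/BiWeekly Contests/#27/5396. Consecutive Characters.py | maxPower1
-- ===== SOURCE A (Python) =====
-- def maxPower1(s: str) -> int:
--     power = 1
--     for uniqueletter in set(s):
--         currentpower = 1
--         reset_power = 1
--         letter_occurrence = [pos for pos,letter in enumerate(s) if letter == uniqueletter]
--         for occurrence in range(len(letter_occurrence)-1):
--             if letter_occurrence[occurrence+1]-letter_occurrence[occurrence] == 1:
--                 currentpower+=1
--             else:
--                 if currentpower > reset_power:
--                     reset_power = currentpower
--                 currentpower = 1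
--         if reset_power>currentpower:
--             biggest_power =  reset_power
--         else:
--             biggest_power = currentpower
--         if biggest_power > power:
--             power=biggest_power
--     return power
-- ===== SOURCE B (Python) =====
-- def maxPower1(s: str) -> int:
--     best = 1
--     cur = 0
--     prev = None
--     for ch in s:
--         cur = cur + 1 if ch == prev else 1
--         if cur > best:
--             best = cur
--         prev = ch
--     return best
-- ===== Notes on version B (the rewrite author's own statement) =====
-- stated objective: faster
-- what changed: Replaced the per-distinct-letter pass (build occurrence-index list, scan gaps) with one single left-to-right scan tracking the current run length and the maximum.
import Mathlib
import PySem

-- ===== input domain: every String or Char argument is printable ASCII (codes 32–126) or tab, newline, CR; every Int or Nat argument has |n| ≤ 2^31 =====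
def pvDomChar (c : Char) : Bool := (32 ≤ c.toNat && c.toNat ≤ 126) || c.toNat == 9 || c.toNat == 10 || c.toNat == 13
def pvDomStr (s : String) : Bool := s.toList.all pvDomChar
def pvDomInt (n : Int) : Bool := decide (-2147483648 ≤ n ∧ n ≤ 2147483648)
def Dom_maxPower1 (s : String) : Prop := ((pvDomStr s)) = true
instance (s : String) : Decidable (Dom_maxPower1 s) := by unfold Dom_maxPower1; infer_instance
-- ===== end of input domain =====

-- B replaces A's per-distinct-letter occurrence-list scan by one single pass tracking the
-- current run length and the maximum (faster: one O(n) scan instead of one scan per letter).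


-- ===== PORT A =====
-- for uniqueletter in set(s): the fold below consumes the set in first-occurrence order;
-- the accumulator is a running max, so the result does not depend on the iteration order.
-- letter_occurrence[occ] / [occ+1] are always in range (occ ∈ range(len-1)), so pyGetD is exact here.
def maxPower1 (s : String) : Int :=
  (PySem.Set.ofList s.toList).foldl (fun power uniqueletter =>
    let letter_occurrence : List Int :=
      ((PySem.List.enumerate s.toList 0).filter (fun p => p.2 == uniqueletter)).map (fun p => p.1)
    let st :=
      (PySem.List.pyRange 0 ((letter_occurrence.length : Int) - 1) 1).foldl
        (fun (st : Int × Int) occurrence =>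
          if PySem.List.pyGetD letter_occurrence (occurrence + 1) 0
              - PySem.List.pyGetD letter_occurrence occurrence 0 == 1 then
            (st.1 + 1, st.2)
          else
            (1, if st.1 > st.2 then st.1 else st.2))
        (1, 1)
    let biggest_power := if st.2 > st.1 then st.2 else st.1
    if biggest_power > power then biggest_power else power) 1

-- ===== PORT B =====
-- the single pass: prev is the previous character (none before the first one)
def bGo : List Char → Option Char → Int → Int → Int
  | [], _, _, best => best
  | ch :: rest, prev, cur, best =>
    let cur' := if some ch == prev then cur + 1 else 1
    let best' := if cur' > best then cur' else best
    bGo rest (some ch) cur' best'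

def maxPower1_alt (s : String) : Int := bGo s.toList none 0 1

-- ===== PRECONDITION & SPEC =====
def Spec_maxPower1 (s : String) (out : Int) : Prop := out = maxPower1_alt s
instance (s : String) (out : Int) : Decidable (Spec_maxPower1 s out) := by unfold Spec_maxPower1; infer_instance

-- ===== CLAIM (what is proved, stated in full; the proofs are below) =====
def Claim_equal_maxPower1 : Prop := ∀ (s : String), Dom_maxPower1 s → Spec_maxPower1 s (maxPower1 s)

-- ===== LEMMAS AND PROOFS =====

-- length of the run of c at the head of the list
def runC (c : Char) : List Char → Int
  | [] => 0
  | x :: xs => if x = c then 1 + runC c xs else 0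

-- length of the longest run of c anywhere in the list
def maxRunC (c : Char) : List Char → Int
  | [] => 0
  | x :: xs => if x = c then max (1 + runC c xs) (maxRunC c xs) else maxRunC c xs

-- length of the longest run of any character
def maxRun : List Char → Int
  | [] => 0
  | x :: xs => max (1 + runC x xs) (maxRun xs)

theorem runC_nonneg (c : Char) (l : List Char) : 0 ≤ runC c l := by
  induction l with
  | nil => simp [runC]
  | cons x xs ih => simp only [runC]; split <;> omega

theorem maxRunC_nonneg (c : Char) (l : List Char) : 0 ≤ maxRunC c l := by
  induction l with
  | nil => simp [maxRunC]
  | cons x xs ih =>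
    have := runC_nonneg c xs
    simp only [maxRunC]; split <;> omega

theorem maxRun_nonneg (l : List Char) : 0 ≤ maxRun l := by
  induction l with
  | nil => simp [maxRun]
  | cons x xs ih =>
    have := runC_nonneg x xs
    simp only [maxRun]; omega

theorem maxRunC_cons_le (c x : Char) (xs : List Char) :
    maxRunC c xs ≤ maxRunC c (x :: xs) := by
  simp only [maxRunC]; split <;> omega

theorem maxRunC_le_maxRun (c : Char) (l : List Char) : maxRunC c l ≤ maxRun l := by
  induction l with
  | nil => simp [maxRunC, maxRun]
  | cons x xs ih =>
    simp only [maxRunC, maxRun]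
    by_cases h : x = c
    · subst h; simp; omega
    · simp [h]; omega

-- ===== B-side: the single pass computes max 1 (maxRun l) =====

theorem bGo_val (c : Char) (l : List Char) :
    ∀ (cur best : Int), 0 ≤ cur → cur ≤ best → 0 ≤ best →
    bGo l (some c) cur best = max best (max (cur + runC c l) (maxRun l)) := by
  induction l generalizing c with
  | nil => intro cur best h1 h2 h3; simp [bGo, runC, maxRun]; omega
  | cons x xs ih =>
    intro cur best h1 h2 h3
    by_cases h : x = c
    · subst h
      simp only [bGo, beq_self_eq_true, if_true]
      rw [ih x (cur + 1) (if cur + 1 > best then cur + 1 else best) (by omega) (by omega) (by omega)]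
      have hr := runC_nonneg x xs
      have hm := maxRun_nonneg xs
      simp only [runC, maxRun, if_true]
      split <;> omega
    · have hbeq : (some x == some c) = false := by
        simp [h]
      simp only [bGo, hbeq, Bool.false_eq_true, if_false]
      rw [ih x 1 (if 1 > best then 1 else best) (by omega) (by omega) (by omega)]
      have hr := runC_nonneg x xs
      have hm := maxRun_nonneg xs
      have hm2 := maxRun_nonneg (x :: xs)
      simp only [runC, maxRun, h, if_false]
      split <;> omega

theorem alt_val (l : List Char) : bGo l none 0 1 = max 1 (maxRun l) := by
  cases l with
  | nil => simp [bGo, maxRun]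
  | cons x xs =>
    simp only [bGo, show ((some x == none) = false) from rfl, Bool.false_eq_true, if_false,
      gt_iff_lt, lt_self_iff_false]
    rw [bGo_val x xs 1 1 (by omega) (by omega) (by omega)]
    simp only [maxRun]

-- ===== A-side: the occurrence-list scan for letter c computes max 1 (maxRunC c l) =====

-- positions (from index k) at which c occurs
def occFrom (c : Char) : List Char → Int → List Int
  | [], _ => []
  | x :: xs, k => if x = c then k :: occFrom c xs (k + 1) else occFrom c xs (k + 1)

theorem occ_eq (c : Char) (l : List Char) : ∀ (k : Int),
    ((PySem.List.enumerate l k).filter (fun p => p.2 == c)).map (fun p => p.1) = occFrom c l k := by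
  induction l with
  | nil => intro k; simp [PySem.List.enumerate_nil, occFrom]
  | cons x xs ih =>
    intro k
    by_cases h : x = c
    · simp [PySem.List.enumerate_cons, occFrom, h, ih (k + 1)]
    · simp [PySem.List.enumerate_cons, occFrom, h, ih (k + 1)]

-- structural form of A's inner gap-scan over the occurrence list
def goP : List Int → Int → Int → Int → Int × Int
  | [], _, cur, reset => (cur, reset)
  | q :: qs, prev, cur, reset =>
    if q - prev = 1 then goP qs q (cur + 1) reset
    else goP qs q 1 (if cur > reset then cur else reset)

def innerBody (P : List Int) (st : Int × Int) (k : Nat) : Int × Int :=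
  if P.getD (k + 1) 0 - P.getD k 0 = 1 then (st.1 + 1, st.2)
  else (1, if st.1 > st.2 then st.1 else st.2)

theorem struct_lemma : ∀ (ps : List Int) (p : Int) (st : Int × Int),
    (List.range ps.length).foldl (innerBody (p :: ps)) st = goP ps p st.1 st.2 := by
  intro ps
  induction ps with
  | nil => intro p st; simp [goP]
  | cons q qs ih =>
    intro p st
    have hlen : (q :: qs).length = qs.length + 1 := rfl
    rw [hlen, List.range_succ_eq_map, List.foldl_cons, List.foldl_map]
    have hfun : (fun st k => innerBody (p :: q :: qs) st (Nat.succ k)) = innerBody (q :: qs) := by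
      funext st k
      simp [innerBody, List.getD]
    have hstep : innerBody (p :: q :: qs) st 0 =
        (if q - p = 1 then (st.1 + 1, st.2) else (1, if st.1 > st.2 then st.1 else st.2)) := by
      simp [innerBody]
    rw [hfun, hstep]
    by_cases h : q - p = 1
    · simp only [h, if_true]
      rw [ih q ((st.1 + 1, st.2))]
      simp [goP, h]
    · rw [if_neg h, ih q]
      simp [goP, h]

-- the character-level scan A's gap-scan amounts to (lastC: the previous char was c)
def goC (c : Char) : List Char → Bool → Int → Int → Int × Int
  | [], _, cur, reset => (cur, reset)
  | x :: xs, lastC, cur, reset =>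
    if x = c then
      (if lastC then goC c xs true (cur + 1) reset else goC c xs true 1 (max reset cur))
    else goC c xs false cur reset

def goC0 (c : Char) : List Char → Int × Int
  | [] => (1, 1)
  | x :: xs => if x = c then goC c xs true 1 1 else goC0 c xs

theorem fusion (c : Char) : ∀ (l : List Char) (k prev cur reset : Int) (b : Bool),
    prev < k → (b = true ↔ prev = k - 1) →
    goP (occFrom c l k) prev cur reset = goC c l b cur reset := by
  intro l
  induction l with
  | nil => intro k prev cur reset b h hb; simp [occFrom, goP, goC]
  | cons x xs ih =>
    intro k prev cur reset b h hb
    by_cases hx : x = c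
    · subst hx
      simp only [occFrom, goP, goC, if_true]
      by_cases hp : k - prev = 1
      · have hb' : b = true := hb.mpr (by omega)
        subst hb'
        rw [if_pos hp, if_pos rfl]
        exact ih (k + 1) k (cur + 1) reset true (by omega) (by simp)
      · have hb' : b = false := by
          cases b with
          | true => exact absurd (hb.mp rfl) (by omega)
          | false => rfl
        subst hb'
        rw [if_neg hp, if_neg (show ¬(false = true) by simp)]
        have hmax : (if cur > reset then cur else reset) = max reset cur := by omega
        rw [hmax]
        exact ih (k + 1) k 1 (max reset cur) true (by omega) (by simp)
    · simp only [occFrom, if_neg hx, goC]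
      exact ih (k + 1) prev cur reset false (by omega) (by simp; omega)

theorem goC0_eq (c : Char) : ∀ (l : List Char) (k : Int),
    (match occFrom c l k with
     | [] => ((1 : Int), (1 : Int))
     | p :: ps => goP ps p 1 1) = goC0 c l := by
  intro l
  induction l with
  | nil => intro k; simp [occFrom, goC0]
  | cons x xs ih =>
    intro k
    by_cases hx : x = c
    · subst hx
      simp only [occFrom, goC0, if_true]
      exact fusion x xs (k + 1) k 1 1 true (by omega) (by simp)
    · simp only [occFrom, goC0]
      rw [if_neg hx, if_neg hx]
      exact ih (k + 1)

theorem goC_val (c : Char) : ∀ (l : List Char) (b : Bool) (cur reset : Int),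
    0 ≤ cur → 0 ≤ reset →
    max (goC c l b cur reset).1 (goC c l b cur reset).2 =
      if b then max reset (max (cur + runC c l) (maxRunC c l))
      else max reset (max cur (maxRunC c l)) := by
  intro l
  induction l with
  | nil =>
    intro b cur reset h1 h2
    cases b <;> simp [goC, runC, maxRunC] <;> omega
  | cons x xs ih =>
    intro b cur reset h1 h2
    have hr := runC_nonneg c xs
    have hm := maxRunC_nonneg c xs
    by_cases hx : x = c
    · subst hx
      cases b with
      | true =>
        simp only [goC, if_true]
        rw [ih true (cur + 1) reset (by omega) (by omega)]
        simp only [runC, maxRunC, if_true]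
        omega
      | false =>
        simp only [goC, if_true, Bool.false_eq_true, if_false]
        rw [ih true 1 (max reset cur) (by omega) (by omega)]
        simp only [maxRunC, if_true]
        omega
    · have e1 : runC c (x :: xs) = 0 := by simp [runC, hx]
      have e2 : maxRunC c (x :: xs) = maxRunC c xs := by simp [maxRunC, hx]
      have e3 : goC c (x :: xs) b cur reset = goC c xs false cur reset := by
        simp [goC, hx]
      rw [e3, ih false cur reset h1 h2]
      cases b with
      | true => simp only [if_true, Bool.false_eq_true, if_false, e1, e2]; omega
      | false => simp only [Bool.false_eq_true, if_false, e1, e2]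

theorem goC0_val (c : Char) (l : List Char) :
    max (goC0 c l).1 (goC0 c l).2 = max 1 (maxRunC c l) := by
  induction l with
  | nil => simp [goC0, maxRunC]
  | cons x xs ih =>
    by_cases hx : x = c
    · subst hx
      simp only [goC0, if_true]
      rw [goC_val x xs true 1 1 (by omega) (by omega)]
      have hr := runC_nonneg x xs
      have hm := maxRunC_nonneg x xs
      simp only [maxRunC, if_true]
    · simp only [goC0, maxRunC]
      rw [if_neg hx, if_neg hx]
      exact ih

-- fold-of-max bounded above
theorem foldl_max_le (g : Char → Int) (b : Int) :
    ∀ (ds : List Char) (a : Int), (∀ c ∈ ds, g c ≤ b) → a ≤ b →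
    ds.foldl (fun a c => max a (g c)) a ≤ b := by
  intro ds
  induction ds with
  | nil => intro a _ h; simpa using h
  | cons d ds ih =>
    intro a hg ha
    simp only [List.foldl_cons]
    exact ih (max a (g d)) (fun c hc => hg c (List.mem_cons_of_mem d hc))
      (by have := hg d (List.mem_cons_self) ; omega)

-- maxRun of any suffix-like list is reached by the fold, given its chars are in ds
theorem maxRun_le_fold (S : List Char) (l : List Char) :
    ∀ (m : List Char), (∀ x ∈ m, x ∈ S) → (∀ c, maxRunC c m ≤ maxRunC c l) →
    maxRun m ≤ S.foldl (fun a c => max a (max 1 (maxRunC c l))) 1 := by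
  intro m
  induction m with
  | nil =>
    intro _ _
    have := (PySem.List.le_foldl_max_int S (fun c => max 1 (maxRunC c l)) 1).1
    have := maxRun_nonneg ([] : List Char)
    simp only [maxRun]; omega
  | cons x xs ih =>
    intro hmem hle
    have h1 : maxRun xs ≤ S.foldl (fun a c => max a (max 1 (maxRunC c l))) 1 := by
      apply ih (fun y hy => hmem y (List.mem_cons_of_mem x hy))
      intro c
      have := maxRunC_cons_le c x xs
      have := hle c
      omega
    have h2 : 1 + runC x xs ≤ maxRunC x l := by
      have hstep : 1 + runC x xs ≤ maxRunC x (x :: xs) := by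
        simp only [maxRunC, if_true]
        exact le_max_left _ _
      have := hle x
      omega
    have h3 : max 1 (maxRunC x l) ≤ S.foldl (fun a c => max a (max 1 (maxRunC c l))) 1 :=
      (PySem.List.le_foldl_max_int S (fun c => max 1 (maxRunC c l)) 1).2 x (hmem x List.mem_cons_self)
    simp only [maxRun]
    omega

-- A's whole fold equals max 1 (maxRun l)
theorem a_val (l : List Char) :
    (PySem.Set.ofList l).foldl (fun power c =>
      let st := goC0 c l
      let biggest := if st.2 > st.1 then st.2 else st.1
      if biggest > power then biggest else power) 1 = max 1 (maxRun l) := by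
  have hbody : (fun (power : Int) (c : Char) =>
      let st := goC0 c l
      let biggest := if st.2 > st.1 then st.2 else st.1
      if biggest > power then biggest else power) =
      fun power c => max power (max 1 (maxRunC c l)) := by
    funext power c
    have h := goC0_val c l
    simp only
    omega
  rw [hbody]
  apply le_antisymm
  · apply foldl_max_le
    · intro c _
      have := maxRunC_le_maxRun c l
      have := maxRun_nonneg l
      omega
    · have := maxRun_nonneg l; omega
  · have h1 : (1 : Int) ≤ (PySem.Set.ofList l).foldl (fun a c => max a (max 1 (maxRunC c l))) 1 :=
      (PySem.List.le_foldl_max_int _ _ _).1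
    have h2 := maxRun_le_fold (PySem.Set.ofList l) l l
      (fun x hx => (PySem.Set.mem_ofList _ _).mpr hx) (fun c => le_refl _)
    omega

-- the port's inner computation for a fixed letter c is goC0 c l
theorem inner_eq (c : Char) (l : List Char) :
    (PySem.List.pyRange 0 ((((((PySem.List.enumerate l 0).filter (fun p => p.2 == c)).map (fun p => p.1)).length : Int)) - 1) 1).foldl
      (fun (st : Int × Int) occurrence =>
        if PySem.List.pyGetD (((PySem.List.enumerate l 0).filter (fun p => p.2 == c)).map (fun p => p.1)) (occurrence + 1) 0
            - PySem.List.pyGetD (((PySem.List.enumerate l 0).filter (fun p => p.2 == c)).map (fun p => p.1)) occurrence 0 == 1 then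
          (st.1 + 1, st.2)
        else
          (1, if st.1 > st.2 then st.1 else st.2))
      (1, 1) = goC0 c l := by
  set P : List Int := ((PySem.List.enumerate l 0).filter (fun p => p.2 == c)).map (fun p => p.1) with hP
  rw [PySem.List.pyRange_one]
  have htoNat : (((P.length : Int)) - 1 - 0).toNat = P.length - 1 := by omega
  rw [htoNat, List.foldl_map]
  have hfun : (fun (st : Int × Int) (k : Nat) =>
      if PySem.List.pyGetD P ((0 : Int) + (k : Int) + 1) 0 - PySem.List.pyGetD P ((0 : Int) + (k : Int)) 0 == 1 then
        (st.1 + 1, st.2)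
      else (1, if st.1 > st.2 then st.1 else st.2)) = innerBody P := by
    funext st k
    have h1 : ((0 : Int) + (k : Int) + 1) = ((k + 1 : Nat) : Int) := by push_cast; ring
    have h2 : ((0 : Int) + (k : Int)) = ((k : Nat) : Int) := by omega
    rw [h1, h2, PySem.List.pyGetD_natCast, PySem.List.pyGetD_natCast]
    simp [innerBody]
  rw [hfun]
  have hocc : P = occFrom c l 0 := by rw [hP, occ_eq]
  rw [← goC0_eq c l 0, ← hocc]
  cases P with
  | nil => simp
  | cons p ps =>
    have hlen : (p :: ps).length - 1 = ps.length := rfl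
    rw [hlen, struct_lemma ps p]

-- ===== VERDICT (by name: the statement is the Claim_ definition above) =====
theorem maxPower1_spec : Claim_equal_maxPower1 := by
  intro s _
  unfold Spec_maxPower1 maxPower1 maxPower1_alt
  rw [alt_val]
  have hbody : (fun (power : Int) (uniqueletter : Char) =>
      let letter_occurrence : List Int :=
        ((PySem.List.enumerate s.toList 0).filter (fun p => p.2 == uniqueletter)).map (fun p => p.1)
      let st :=
        (PySem.List.pyRange 0 ((letter_occurrence.length : Int) - 1) 1).foldl
          (fun (st : Int × Int) occurrence =>
            if PySem.List.pyGetD letter_occurrence (occurrence + 1) 0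
                - PySem.List.pyGetD letter_occurrence occurrence 0 == 1 then
              (st.1 + 1, st.2)
            else
              (1, if st.1 > st.2 then st.1 else st.2))
          (1, 1)
      let biggest_power := if st.2 > st.1 then st.2 else st.1
      if biggest_power > power then biggest_power else power) =
      (fun (power : Int) (c : Char) =>
        let st := goC0 c s.toList
        let biggest := if st.2 > st.1 then st.2 else st.1
        if biggest > power then biggest else power) := by
    funext power c
    simp only
    rw [inner_eq c s.toList]
  rw [hbody, a_val]
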